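-- pv_equiv track=rewrite | github.com/kashyapchhatbar/CLASHChimeras | build/lib/clashchimeras/methods.py | chimeraOrNot
-- ===== SOURCE A (Python) =====
-- def chimeraOrNot(bitOne, bitTwo, overlap=4, gap=9):
--     combinedCigar = ""
--     for i, j in zip(bitOne, bitTwo):
--         if i == "M" and j == "M":
--             combinedCigar += "="
--         elif i == "S" and j == "S":
--             combinedCigar += "#"
--         elif i == "I" and j == "D":
--             combinedCigar += "-"
--         elif i == "D" and j == "I":
--             combinedCigar += "-"
--         elif i == "M" and j != "M":
--             combinedCigar += "{"
--         elif i != "M" and j == "M":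
--             combinedCigar += "}"
--         elif i != "M" and j == "D":
--             combinedCigar += "-"
--         elif i == "D" and j != "M":
--             combinedCigar += "-"
--         elif i == "I" and j != "M":
--             combinedCigar += "+"
--         elif i != "M" and j == "I":
--             combinedCigar += "+"
--         else:
--             combinedCigar += "*"
--     numberOfMs = len(list(filter(lambda x: x == "=", combinedCigar)))
--     curlyStartStart = combinedCigar.find("{")
--     curlyStartEnd = combinedCigar.rfind("{")
--     curlyEndStart = combinedCigar.find("}")
--     curlyEndEnd = combinedCigar.rfind("}")
--     listCurlies = sorted([[curlyStartStart, curlyStartEnd], [curlyEndStart,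
--                                                              curlyEndEnd]])
--     matches = combinedCigar.count("{") + combinedCigar.count("}") + \
--         combinedCigar.count("=") + combinedCigar.count("-") + \
--         combinedCigar.count("+")
--     if numberOfMs <= overlap and abs(listCurlies[0][1] - listCurlies[1][0]) \
--             <= gap and matches >= (0.75 * len(combinedCigar)):
--         return combinedCigar
--     else:
--         return None
-- ===== SOURCE B (Python) =====
-- def chimeraOrNot(bitOne, bitTwo, overlap=4, gap=9):
--     # One pass: build the combined cigar and maintain all statistics
--     # (number of '=', matches count, first/last '{' and '}') in the same loop,
--     # instead of A's five separate post-scans (filter/find/rfind/count).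
--     chars = []
--     numberOfMs = 0
--     matches = 0
--     n = 0
--     firstOpen = lastOpen = firstClose = lastClose = -1
--     for i, j in zip(bitOne, bitTwo):
--         if i == "M":
--             ch = "=" if j == "M" else "{"
--         elif j == "M":
--             ch = "}"
--         elif i == "S" and j == "S":
--             ch = "#"
--         elif i == "D" or j == "D":
--             ch = "-"
--         elif i == "I" or j == "I":
--             ch = "+"
--         else:
--             ch = "*"
--         chars.append(ch)
--         if ch == "=":
--             numberOfMs += 1
--             matches += 1
--         elif ch == "{":
--             if firstOpen < 0:
--                 firstOpen = n
--             lastOpen = n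
--             matches += 1
--         elif ch == "}":
--             if firstClose < 0:
--                 firstClose = n
--             lastClose = n
--             matches += 1
--         elif ch == "-" or ch == "+":
--             matches += 1
--         n += 1
--     if (firstOpen, lastOpen) <= (firstClose, lastClose):
--         inner = abs(lastOpen - firstClose)
--     else:
--         inner = abs(lastClose - firstOpen)
--     if numberOfMs <= overlap and inner <= gap and 4 * matches >= 3 * n:
--         return "".join(chars)
--     return None
-- ===== Notes on version B (the rewrite author's own statement) =====
-- stated objective: alternative
-- what changed: A's five separate post-scans of the combined cigar (a filter for '=', find/rfind for '{' and '}', and five .count calls) are fused into the single zip loop, which maintains the '=' count, the matches count and first/last indices of '{' and '}' incrementally, and the classification if-chain is restructured (nested on i=='M'/j=='M' first).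
import Mathlib
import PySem

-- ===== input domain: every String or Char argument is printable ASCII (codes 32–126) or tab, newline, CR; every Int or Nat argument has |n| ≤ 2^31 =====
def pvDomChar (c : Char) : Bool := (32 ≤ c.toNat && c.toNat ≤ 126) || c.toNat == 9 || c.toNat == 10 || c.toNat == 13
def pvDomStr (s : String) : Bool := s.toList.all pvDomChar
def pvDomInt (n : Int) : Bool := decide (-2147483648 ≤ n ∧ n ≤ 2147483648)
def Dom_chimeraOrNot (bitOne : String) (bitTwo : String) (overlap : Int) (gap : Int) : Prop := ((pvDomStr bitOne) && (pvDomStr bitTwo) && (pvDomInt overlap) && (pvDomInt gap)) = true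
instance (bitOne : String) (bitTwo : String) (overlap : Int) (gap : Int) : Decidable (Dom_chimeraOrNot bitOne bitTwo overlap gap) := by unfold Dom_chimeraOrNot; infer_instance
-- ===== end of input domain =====

-- B fuses A's five post-scans of the combined cigar into the single zip loop
-- (same return value; no speed claim).

-- ===== PORT A =====
-- the if/elif chain classifying one (i, j) pair, verbatim
def clsA (i j : Char) : Char :=
  if i = 'M' ∧ j = 'M' then '='
  else if i = 'S' ∧ j = 'S' then '#'
  else if i = 'I' ∧ j = 'D' then '-'
  else if i = 'D' ∧ j = 'I' then '-'
  else if i = 'M' ∧ j ≠ 'M' then '{'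
  else if i ≠ 'M' ∧ j = 'M' then '}'
  else if i ≠ 'M' ∧ j = 'D' then '-'
  else if i = 'D' ∧ j ≠ 'M' then '-'
  else if i = 'I' ∧ j ≠ 'M' then '+'
  else if i ≠ 'M' ∧ j = 'I' then '+'
  else '*'

-- `matches >= 0.75 * len(...)` is ported as `4 * matches ≥ 3 * len` — exact, since
-- 0.75 * n is computed exactly in binary floating point for every list length n here.
def chimeraOrNot (bitOne : String) (bitTwo : String) (overlap : Int) (gap : Int) : Option String :=
  let combinedCigar : List Char :=
    (bitOne.toList.zip bitTwo.toList).foldl (fun acc p => acc ++ [clsA p.1 p.2]) []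
  let numberOfMs : Int := ((combinedCigar.filter (fun x => x == '=')).length : Int)
  let curlyStartStart := PySem.Chars.find combinedCigar ['{']
  let curlyStartEnd := PySem.Chars.rfind combinedCigar ['{']
  let curlyEndStart := PySem.Chars.find combinedCigar ['}']
  let curlyEndEnd := PySem.Chars.rfind combinedCigar ['}']
  let listCurlies := PySem.List.sorted
    ([[curlyStartStart, curlyStartEnd], [curlyEndStart, curlyEndEnd]] : List (List Int))
    (fun x => x) false
  let mts : Int :=
    (PySem.Chars.count combinedCigar ['{'] : Int) + (PySem.Chars.count combinedCigar ['}'] : Int) +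
    (PySem.Chars.count combinedCigar ['='] : Int) + (PySem.Chars.count combinedCigar ['-'] : Int) +
    (PySem.Chars.count combinedCigar ['+'] : Int)
  match listCurlies with
  | [[_, b], [c, _]] =>  -- listCurlies[0][1], listCurlies[1][0] (always this shape: totality guard)
      if numberOfMs ≤ overlap ∧ |b - c| ≤ gap ∧ 4 * mts ≥ 3 * (combinedCigar.length : Int) then
        some (String.ofList combinedCigar)
      else none
  | _ => none

-- ===== PORT B =====
def clsB (i j : Char) : Char :=
  if i = 'M' then (if j = 'M' then '=' else '{')
  else if j = 'M' then '}'
  else if i = 'S' ∧ j = 'S' then '#'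
  else if i = 'D' ∨ j = 'D' then '-'
  else if i = 'I' ∨ j = 'I' then '+'
  else '*'

structure BState where
  chars : List Char
  nMs : Int
  mts : Int
  n : Int
  fo : Int
  lo : Int
  fc : Int
  lc : Int
deriving Repr, DecidableEq

def stepB (st : BState) (p : Char × Char) : BState :=
  let ch := clsB p.1 p.2
  let st := { st with chars := st.chars ++ [ch] }
  let st :=
    if ch = '=' then { st with nMs := st.nMs + 1, mts := st.mts + 1 }
    else if ch = '{' then
      { st with fo := if st.fo < 0 then st.n else st.fo, lo := st.n, mts := st.mts + 1 }
    else if ch = '}' then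
      { st with fc := if st.fc < 0 then st.n else st.fc, lc := st.n, mts := st.mts + 1 }
    else if ch = '-' ∨ ch = '+' then { st with mts := st.mts + 1 }
    else st
  { st with n := st.n + 1 }

def chimeraOrNot_alt (bitOne : String) (bitTwo : String) (overlap : Int) (gap : Int) : Option String :=
  let st := (bitOne.toList.zip bitTwo.toList).foldl stepB ⟨[], 0, 0, 0, -1, -1, -1, -1⟩
  let inner : Int :=
    if st.fo < st.fc ∨ (st.fo = st.fc ∧ st.lo ≤ st.lc) then |st.lo - st.fc| else |st.lc - st.fo|
  if st.nMs ≤ overlap ∧ inner ≤ gap ∧ 4 * st.mts ≥ 3 * st.n then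
    some (String.ofList st.chars)
  else none

-- ===== PRECONDITION & SPEC =====
def Spec_chimeraOrNot (bitOne : String) (bitTwo : String) (overlap : Int) (gap : Int) (out : Option String) : Prop := out = chimeraOrNot_alt bitOne bitTwo overlap gap
instance (bitOne : String) (bitTwo : String) (overlap : Int) (gap : Int) (out : Option String) : Decidable (Spec_chimeraOrNot bitOne bitTwo overlap gap out) := by unfold Spec_chimeraOrNot; infer_instance

-- ===== CLAIM (what is proved, stated in full; the proofs are below) =====
def Claim_equal_chimeraOrNot : Prop := ∀ (bitOne : String) (bitTwo : String) (overlap : Int) (gap : Int), Dom_chimeraOrNot bitOne bitTwo overlap gap → Spec_chimeraOrNot bitOne bitTwo overlap gap (chimeraOrNot bitOne bitTwo overlap gap)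

-- ===== LEMMAS AND PROOFS =====

theorem cls_eq (i j : Char) : clsA i j = clsB i j := by
  unfold clsA clsB
  by_cases hiM : i = 'M' <;> by_cases hjM : j = 'M' <;>
    by_cases hiD : i = 'D' <;> by_cases hjD : j = 'D' <;>
    by_cases hiI : i = 'I' <;> by_cases hjI : j = 'I' <;>
    simp_all

theorem cls_cases (i j : Char) :
    clsB i j = '=' ∨ clsB i j = '{' ∨ clsB i j = '}' ∨ clsB i j = '#' ∨
    clsB i j = '-' ∨ clsB i j = '+' ∨ clsB i j = '*' := by
  unfold clsB; split_ifs <;> simp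

-- the state B's loop maintains, expressed by A's post-scan quantities over the prefix
def mkState (s : List Char) : BState :=
  ⟨s, ((s.filter (fun x => x == '=')).length : Int),
   ((s.count '{' : Int) + (s.count '}' : Int) + (s.count '=' : Int) + (s.count '-' : Int) + (s.count '+' : Int)),
   (s.length : Int),
   PySem.Chars.find s ['{'], PySem.Chars.rfind s ['{'],
   PySem.Chars.find s ['}'], PySem.Chars.rfind s ['}']⟩

theorem prefixSingleton (c h : Char) (t : List Char) :
    [c].isPrefixOf (h :: t) = (c == h) := by
  simp [List.isPrefixOf]

theorem fgo_nil (c : Char) (k : Nat) : PySem.Chars.find.go [c] [] k = -1 := by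
  rw [PySem.Chars.find.go.eq_def]; simp

theorem find_go_snoc (c x : Char) : ∀ (s : List Char) (k : Nat),
    PySem.Chars.find.go [c] (s ++ [x]) k =
      (if PySem.Chars.find.go [c] s k = -1 then
        (if x = c then ((k + s.length : Nat) : Int) else -1)
       else PySem.Chars.find.go [c] s k) := by
  intro s
  induction s with
  | nil =>
    intro k
    simp only [List.nil_append, fgo_nil, if_pos rfl, List.length_nil, Nat.add_zero]
    rw [PySem.Chars.find.go.eq_def]
    by_cases hcx : c = x
    · subst hcx; simp [prefixSingleton]
    · have hxc : ¬ x = c := fun h' => hcx h'.symm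
      simp [prefixSingleton, hcx, hxc, fgo_nil]
  | cons h t ih =>
    intro k
    rw [PySem.Chars.find.go.eq_def]
    conv_rhs => rw [PySem.Chars.find.go.eq_def]
    simp only [List.cons_append]
    by_cases hch : c = h
    · have hk : ((k : Int)) ≠ -1 := by omega
      simp [prefixSingleton, hch, hk]
    · simp only [prefixSingleton, ne_eq, hch, not_false_eq_true, if_neg, beq_iff_eq]
      rw [ih (k + 1)]
      have harith : k + 1 + t.length = k + (t.length + 1) := by omega
      simp [harith]

theorem find_snoc (s : List Char) (x c : Char) :
    PySem.Chars.find (s ++ [x]) [c] =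
      (if PySem.Chars.find s [c] = -1 then (if x = c then (s.length : Int) else -1)
       else PySem.Chars.find s [c]) := by
  unfold PySem.Chars.find
  rw [find_go_snoc]
  simp

theorem rgo_zero (t sub : List Char) :
    PySem.Chars.rfind.go t sub 0 = if sub.isPrefixOf t = true then 0 else -1 := by
  rw [PySem.Chars.rfind.go.eq_def]

theorem rgo_succ (t sub : List Char) (j : Nat) :
    PySem.Chars.rfind.go t sub (j + 1) =
      if sub.isPrefixOf (List.drop (j + 1) t) = true then ((j + 1 : Nat) : Int)
      else PySem.Chars.rfind.go t sub j := by
  rw [PySem.Chars.rfind.go.eq_def]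

theorem rfind_go_lt (c x : Char) (s : List Char) : ∀ (j : Nat), j < s.length →
    PySem.Chars.rfind.go (s ++ [x]) [c] j = PySem.Chars.rfind.go s [c] j := by
  intro j
  induction j with
  | zero =>
    intro hj
    rw [rgo_zero, rgo_zero]
    cases s with
    | nil => simp at hj
    | cons h t => simp [List.cons_append, prefixSingleton]
  | succ j ih =>
    intro hj
    rw [rgo_succ, rgo_succ]
    have hd : List.drop (j + 1) (s ++ [x]) = List.drop (j + 1) s ++ [x] :=
      List.drop_append_of_le_length (by omega)
    have hne : List.drop (j + 1) s ≠ [] := by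
      simp only [ne_eq, List.drop_eq_nil_iff]; omega
    obtain ⟨y, ys, hys⟩ := List.exists_cons_of_ne_nil hne
    rw [hd, hys]
    simp [List.cons_append, prefixSingleton, ih (by omega)]

theorem rfind_snoc (s : List Char) (x c : Char) :
    PySem.Chars.rfind (s ++ [x]) [c] =
      (if x = c then (s.length : Int) else PySem.Chars.rfind s [c]) := by
  unfold PySem.Chars.rfind
  have hlen : (s ++ [x]).length = s.length + 1 := by simp
  rw [hlen, rgo_succ]
  have hd0 : List.drop (s.length + 1) (s ++ [x]) = [] := by
    simp [List.drop_eq_nil_iff]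
  rw [hd0]
  simp only [List.isPrefixOf, Bool.false_eq_true, if_false]
  cases s with
  | nil =>
    simp only [List.nil_append, List.length_nil]
    rw [rgo_zero, rgo_zero]
    by_cases hcx : c = x
    · subst hcx; simp [prefixSingleton]
    · have hxc : ¬ x = c := fun h' => hcx h'.symm
      simp [prefixSingleton, List.isPrefixOf, hcx, hxc]
  | cons h t =>
    simp only [List.length_cons]
    rw [rgo_succ]
    have hd1 : List.drop (t.length + 1) ((h :: t) ++ [x]) = [x] := by
      rw [List.drop_append_of_le_length (by simp)]
      simp
    rw [hd1, prefixSingleton]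
    by_cases hcx : c = x
    · subst hcx; simp
    · have hxc : ¬ x = c := fun h' => hcx h'.symm
      simp only [beq_iff_eq, hcx, if_false, hxc]
      rw [rfind_go_lt c x (h :: t) t.length (by simp), rgo_succ]
      have hd2 : List.drop (t.length + 1) (h :: t) = [] := by
        simp [List.drop_eq_nil_iff]
      simp [hd2, List.isPrefixOf]

theorem cgo_cons (c h : Char) (t : List Char) (f acc : Nat) :
    PySem.Chars.count.go [c] (f + 1) (h :: t) acc =
      if [c].isPrefixOf (h :: t) = true then PySem.Chars.count.go [c] f t (acc + 1)
      else PySem.Chars.count.go [c] f t acc := by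
  rw [PySem.Chars.count.go.eq_def]
  exact rfl

theorem count_go_eq (c : Char) : ∀ (l : List Char) (fuel acc : Nat), l.length ≤ fuel →
    PySem.Chars.count.go [c] fuel l acc = acc + l.count c := by
  intro l
  induction l with
  | nil =>
    intro fuel acc _
    rw [PySem.Chars.count.go.eq_def]
    cases fuel <;> simp
  | cons h t ih =>
    intro fuel acc hlen
    cases fuel with
    | zero => simp at hlen
    | succ f =>
      rw [cgo_cons]
      have hlf : t.length ≤ f := by simp at hlen; omega
      by_cases hch : c = h
      · subst hch
        simp only [prefixSingleton, beq_self_eq_true, if_true]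
        rw [ih f (acc + 1) hlf]
        simp [List.count_cons]
        omega
      · have hhc : ¬ h = c := fun h' => hch h'.symm
        simp only [prefixSingleton, beq_iff_eq, hch, if_false]
        rw [ih f acc hlf]
        simp [List.count_cons, hhc]

theorem count_singleton (s : List Char) (c : Char) :
    PySem.Chars.count s [c] = s.count c := by
  unfold PySem.Chars.count
  have he : ([c] : List Char).isEmpty = false := rfl
  rw [he]
  simp [count_go_eq c s s.length 0 (Nat.le_refl _)]

theorem find_neg_iff (s : List Char) (c : Char) :
    PySem.Chars.find s [c] < 0 ↔ PySem.Chars.find s [c] = -1 := by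
  have h := PySem.Chars.neg_one_le_find s [c]
  omega

theorem if_neg_one_collapse (a : Int) : (if a = -1 then (-1 : Int) else a) = a := by
  by_cases h : a = -1 <;> simp [h]

theorem step_mkState (s : List Char) (p : Char × Char) :
    stepB (mkState s) p = mkState (s ++ [clsB p.1 p.2]) := by
  rcases cls_cases p.1 p.2 with h | h | h | h | h | h | h <;>
    · unfold stepB mkState
      rw [h]
      simp [find_snoc, rfind_snoc, find_neg_iff, if_neg_one_collapse,
        List.filter_append, List.count_append, BState.mk.injEq]
      all_goals and_intros <;> (try push_cast) <;> try omega

theorem foldB (l : List (Char × Char)) : ∀ (s : List Char),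
    l.foldl stepB (mkState s) = mkState (s ++ l.map (fun p => clsB p.1 p.2)) := by
  induction l with
  | nil => intro s; simp
  | cons p t ih => intro s; simp [List.foldl_cons, step_mkState, ih]

theorem mkState_nil : mkState [] = ⟨[], 0, 0, 0, -1, -1, -1, -1⟩ := by
  unfold mkState
  simp [PySem.Chars.find, PySem.Chars.rfind, fgo_nil, rgo_zero, List.isPrefixOf]

theorem sorted_two (u v : List Int) :
    PySem.List.sorted [u, v] (fun x => x) false = if v < u then [v, u] else [u, v] := by
  simp [PySem.List.sorted_eq_foldl_insertBy, PySem.List.insertBy]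

theorem lex_two (a b c d : Int) : ([c, d] < [a, b]) ↔ (c < a ∨ (c = a ∧ d < b)) := by
  constructor
  · intro h
    cases h with
    | rel h => exact Or.inl h
    | cons h =>
      cases h with
      | rel h2 => exact Or.inr ⟨rfl, h2⟩
      | cons h3 => cases h3
  · intro h
    rcases h with h | ⟨h1, h2⟩
    · exact List.Lex.rel h
    · subst h1; exact List.Lex.cons (List.Lex.rel h2)

-- ===== VERDICT (by name: the statement is the Claim_ definition above) =====
theorem chimeraOrNot_spec : Claim_equal_chimeraOrNot := by
  intro bitOne bitTwo overlap gap _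
  unfold Spec_chimeraOrNot chimeraOrNot chimeraOrNot_alt
  have hmap : (bitOne.toList.zip bitTwo.toList).map (fun p => clsA p.1 p.2)
      = (bitOne.toList.zip bitTwo.toList).map (fun p => clsB p.1 p.2) :=
    List.map_congr_left (fun p _ => cls_eq p.1 p.2)
  rw [PySem.List.foldl_append_singleton_eq_map, List.nil_append, hmap, ← mkState_nil,
    foldB, List.nil_append]
  set s := (bitOne.toList.zip bitTwo.toList).map (fun p => clsB p.1 p.2) with hs
  simp only [mkState, count_singleton, sorted_two]
  set fo := PySem.Chars.find s ['{'] with hfo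
  set lo := PySem.Chars.rfind s ['{'] with hlo
  set fc := PySem.Chars.find s ['}'] with hfc
  set lc := PySem.Chars.rfind s ['}'] with hlc
  by_cases hsw : [fc, lc] < [fo, lo]
  · rw [if_pos hsw]
    rw [lex_two] at hsw
    have hb : ¬ (fo < fc ∨ (fo = fc ∧ lo ≤ lc)) := by omega
    rw [if_neg hb]
  · rw [if_neg hsw]
    rw [lex_two] at hsw
    have hb : fo < fc ∨ (fo = fc ∧ lo ≤ lc) := by omega
    rw [if_pos hb]
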